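-- pv_equiv track=rewrite | github.com/Jameshuff91/open-cure | src/production_predictor.py | _is_established_cv_drug
-- ===== SOURCE A (Python) =====
-- def _is_established_cv_drug(drug_name: str) -> bool:
--     """
--     h618: Check if drug belongs to an established cardiovascular drug class.
--
--     CV drug classes with MEDIUM-level holdout precision (expanded GT, 5-seed):
--     - Anticoagulants/antiplatelets: 32.6% ± 23.4% (n=14.2/seed)
--     - CCBs: 49.7% ± 34.6% (n=3.4/seed)
--     - Diuretics: 33.8% ± 32.4% (n=3.2/seed)
--     - ARBs: 30.0% ± 40.0% (n=3.0/seed)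
--     - Statins, beta-blockers, ACE inhibitors, antiarrhythmics: high holdout but small-n
--
--     Non-CV drugs (antibiotics, biologics, corticosteroids) in CV demotion: <3-18% holdout.
--     Corticosteroid CS→CV already handled separately by h557/h520.
--
--     Returns True if drug is a genuine cardiovascular pharmacotherapy.
--     """
--     drug_lower = drug_name.lower().strip()
--
--     # Anticoagulants/antiplatelets (32.6% holdout, n=14.2/seed)
--     anticoag = ['warfarin', 'heparin', 'enoxaparin', 'rivaroxaban', 'apixaban',
--                 'dabigatran', 'edoxaban', 'clopidogrel', 'ticagrelor', 'prasugrel',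
--                 'dipyridamole', 'cilostazol', 'fondaparinux', 'dalteparin',
--                 'tinzaparin', 'eptifibatide', 'vorapaxar']
--
--     # CCBs (49.7% holdout)
--     ccbs = ['amlodipine', 'nifedipine', 'diltiazem', 'verapamil', 'felodipine',
--             'nicardipine', 'nimodipine', 'isradipine', 'clevidipine']
--
--     # Diuretics (33.8% holdout)
--     diuretics = ['hydrochlorothiazide', 'furosemide', 'spironolactone', 'chlorthalidone',
--                  'bumetanide', 'torsemide', 'torasemide', 'amiloride', 'triamterene',
--                  'indapamide', 'metolazone', 'eplerenone']
--
--     # ARBs (30.0% holdout)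
--     arbs = ['losartan', 'valsartan', 'irbesartan', 'candesartan', 'telmisartan',
--             'olmesartan', 'eprosartan', 'azilsartan']
--
--     # Statins (56.7% holdout, small-n but consistently high)
--     statins = ['atorvastatin', 'simvastatin', 'rosuvastatin', 'pravastatin',
--                'lovastatin', 'fluvastatin', 'pitavastatin']
--
--     # Beta-blockers (50.0% holdout, small-n)
--     betas = ['metoprolol', 'atenolol', 'propranolol', 'carvedilol', 'bisoprolol',
--              'nebivolol', 'labetalol', 'nadolol', 'sotalol', 'timolol',
--              'acebutolol', 'pindolol', 'esmolol', 'landiolol']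
--
--     # ACE inhibitors (18.7% holdout, small-n but genuine CV)
--     ace_inhibitors = ['enalapril', 'lisinopril', 'ramipril', 'captopril', 'perindopril',
--                       'quinapril', 'benazepril', 'fosinopril', 'trandolapril', 'moexipril']
--
--     # Antiarrhythmics (60.0% holdout, small-n)
--     antiarrhythmics = ['amiodarone', 'flecainide', 'propafenone', 'dronedarone',
--                        'dofetilide', 'ibutilide', 'mexiletine', 'procainamide',
--                        'quinidine', 'disopyramide']
--
--     # Nitrates/vasodilators (40.0% holdout, very small-n)
--     nitrates = ['nitroglycerin', 'isosorbide', 'hydralazine', 'minoxidil']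
--
--     # Other established CV drugs
--     other_cv = ['digoxin', 'digitoxin', 'milrinone', 'ranolazine', 'ivabradine',
--                 'bosentan', 'ambrisentan', 'macitentan', 'treprostinil', 'epoprostenol',
--                 'iloprost', 'sildenafil', 'tadalafil',  # PAH-indicated PDE5i
--                 'fenofibrate', 'gemfibrozil', 'bezafibrate',  # fibrates
--                 'doxazosin', 'prazosin', 'terazosin',  # alpha blockers
--                 'clonidine', 'methyldopa', 'guanfacine',  # centrally acting
--                 'aliskiren', 'alirocumab', 'evolocumab',  # renin/PCSK9
--                 'cholestyramine', 'colestipol', 'colesevelam',  # bile acid sequestrants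
--                 'niacin', 'icosapent', 'papaverine', 'adenosine',
--                 'alteplase', 'tenecteplase', 'reteplase',  # thrombolytics
--                 'pentoxifylline']  # peripheral vascular
--
--     all_cv_drugs = (anticoag + ccbs + diuretics + arbs + statins + betas +
--                     ace_inhibitors + antiarrhythmics + nitrates + other_cv)
--
--     for drug in all_cv_drugs:
--         if drug in drug_lower:
--             return True
--     return False
-- ===== SOURCE B (Python) =====
-- def _is_established_cv_drug(drug_name: str) -> bool:
--     """First-letter-indexed single scan: walk the name once and, at each position,
--     test only the CV terms that start with that character."""
--     drug_lower = drug_name.lower().strip()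
--
--     terms = ['warfarin', 'heparin', 'enoxaparin', 'rivaroxaban', 'apixaban',
--              'dabigatran', 'edoxaban', 'clopidogrel', 'ticagrelor', 'prasugrel',
--              'dipyridamole', 'cilostazol', 'fondaparinux', 'dalteparin',
--              'tinzaparin', 'eptifibatide', 'vorapaxar',
--              'amlodipine', 'nifedipine', 'diltiazem', 'verapamil', 'felodipine',
--              'nicardipine', 'nimodipine', 'isradipine', 'clevidipine',
--              'hydrochlorothiazide', 'furosemide', 'spironolactone', 'chlorthalidone',
--              'bumetanide', 'torsemide', 'torasemide', 'amiloride', 'triamterene',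
--              'indapamide', 'metolazone', 'eplerenone',
--              'losartan', 'valsartan', 'irbesartan', 'candesartan', 'telmisartan',
--              'olmesartan', 'eprosartan', 'azilsartan',
--              'atorvastatin', 'simvastatin', 'rosuvastatin', 'pravastatin',
--              'lovastatin', 'fluvastatin', 'pitavastatin',
--              'metoprolol', 'atenolol', 'propranolol', 'carvedilol', 'bisoprolol',
--              'nebivolol', 'labetalol', 'nadolol', 'sotalol', 'timolol',
--              'acebutolol', 'pindolol', 'esmolol', 'landiolol',
--              'enalapril', 'lisinopril', 'ramipril', 'captopril', 'perindopril',
--              'quinapril', 'benazepril', 'fosinopril', 'trandolapril', 'moexipril',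
--              'amiodarone', 'flecainide', 'propafenone', 'dronedarone',
--              'dofetilide', 'ibutilide', 'mexiletine', 'procainamide',
--              'quinidine', 'disopyramide',
--              'nitroglycerin', 'isosorbide', 'hydralazine', 'minoxidil',
--              'digoxin', 'digitoxin', 'milrinone', 'ranolazine', 'ivabradine',
--              'bosentan', 'ambrisentan', 'macitentan', 'treprostinil', 'epoprostenol',
--              'iloprost', 'sildenafil', 'tadalafil',
--              'fenofibrate', 'gemfibrozil', 'bezafibrate',
--              'doxazosin', 'prazosin', 'terazosin',
--              'clonidine', 'methyldopa', 'guanfacine',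
--              'aliskiren', 'alirocumab', 'evolocumab',
--              'cholestyramine', 'colestipol', 'colesevelam',
--              'niacin', 'icosapent', 'papaverine', 'adenosine',
--              'alteplase', 'tenecteplase', 'reteplase',
--              'pentoxifylline']
--
--     by_first = {}
--     for t in terms:
--         by_first[t[0]] = by_first.get(t[0], []) + [t]
--
--     for i, ch in enumerate(drug_lower):
--         for t in by_first.get(ch, []):
--             if drug_lower.startswith(t, i):
--                 return True
--     return False
-- ===== Notes on version B (the rewrite author's own statement) =====
-- stated objective: alternative
-- what changed: B replaces A's per-term full-string membership loop by a dictionary grouping the ~120 terms by first letter built once, then a single left-to-right scan of the name that prefix-tests only the terms indexed under the current character.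
import Mathlib
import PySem

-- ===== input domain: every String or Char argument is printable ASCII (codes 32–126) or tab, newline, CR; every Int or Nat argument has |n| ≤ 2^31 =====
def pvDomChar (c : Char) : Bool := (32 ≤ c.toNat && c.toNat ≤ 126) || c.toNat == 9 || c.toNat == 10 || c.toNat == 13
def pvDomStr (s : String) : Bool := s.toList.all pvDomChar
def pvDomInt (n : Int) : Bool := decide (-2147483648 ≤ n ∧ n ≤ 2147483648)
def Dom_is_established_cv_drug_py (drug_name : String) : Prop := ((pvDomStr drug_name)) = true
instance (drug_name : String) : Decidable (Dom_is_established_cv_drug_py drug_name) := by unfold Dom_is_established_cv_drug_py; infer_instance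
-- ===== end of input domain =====

-- B indexes the same CV-drug terms by first letter and scans the name once, prefix-testing
-- only the terms filed under the current character (alternative structure, same result).

-- ===== PORT A =====
-- A's term lists, transliterated one by one.
def pvAnticoag : List String := ["warfarin", "heparin", "enoxaparin", "rivaroxaban", "apixaban",
  "dabigatran", "edoxaban", "clopidogrel", "ticagrelor", "prasugrel",
  "dipyridamole", "cilostazol", "fondaparinux", "dalteparin",
  "tinzaparin", "eptifibatide", "vorapaxar"]
def pvCcbs : List String := ["amlodipine", "nifedipine", "diltiazem", "verapamil", "felodipine",
  "nicardipine", "nimodipine", "isradipine", "clevidipine"]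
def pvDiuretics : List String := ["hydrochlorothiazide", "furosemide", "spironolactone", "chlorthalidone",
  "bumetanide", "torsemide", "torasemide", "amiloride", "triamterene",
  "indapamide", "metolazone", "eplerenone"]
def pvArbs : List String := ["losartan", "valsartan", "irbesartan", "candesartan", "telmisartan",
  "olmesartan", "eprosartan", "azilsartan"]
def pvStatins : List String := ["atorvastatin", "simvastatin", "rosuvastatin", "pravastatin",
  "lovastatin", "fluvastatin", "pitavastatin"]
def pvBetas : List String := ["metoprolol", "atenolol", "propranolol", "carvedilol", "bisoprolol",
  "nebivolol", "labetalol", "nadolol", "sotalol", "timolol",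
  "acebutolol", "pindolol", "esmolol", "landiolol"]
def pvAceInhibitors : List String := ["enalapril", "lisinopril", "ramipril", "captopril", "perindopril",
  "quinapril", "benazepril", "fosinopril", "trandolapril", "moexipril"]
def pvAntiarrhythmics : List String := ["amiodarone", "flecainide", "propafenone", "dronedarone",
  "dofetilide", "ibutilide", "mexiletine", "procainamide",
  "quinidine", "disopyramide"]
def pvNitrates : List String := ["nitroglycerin", "isosorbide", "hydralazine", "minoxidil"]
def pvOtherCv : List String := ["digoxin", "digitoxin", "milrinone", "ranolazine", "ivabradine",
  "bosentan", "ambrisentan", "macitentan", "treprostinil", "epoprostenol",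
  "iloprost", "sildenafil", "tadalafil",
  "fenofibrate", "gemfibrozil", "bezafibrate",
  "doxazosin", "prazosin", "terazosin",
  "clonidine", "methyldopa", "guanfacine",
  "aliskiren", "alirocumab", "evolocumab",
  "cholestyramine", "colestipol", "colesevelam",
  "niacin", "icosapent", "papaverine", "adenosine",
  "alteplase", "tenecteplase", "reteplase",
  "pentoxifylline"]
def pvAllCvDrugs : List String :=
  pvAnticoag ++ pvCcbs ++ pvDiuretics ++ pvArbs ++ pvStatins ++ pvBetas ++
  pvAceInhibitors ++ pvAntiarrhythmics ++ pvNitrates ++ pvOtherCv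

-- A's for-loop with early return: first term contained in drug_lower yields true.
def pvLoopA (ts : List String) (drug_lower : String) : Bool :=
  match ts with
  | [] => false
  | t :: rest => if PySem.Str.isIn t drug_lower then true else pvLoopA rest drug_lower

def is_established_cv_drug_py (drug_name : String) : Bool :=
  pvLoopA pvAllCvDrugs (PySem.Str.strip (PySem.Str.lower drug_name))

-- ===== PORT B =====
-- B's flat term list (the literal concatenation of the same lists).
def pvTermsB : List String := ["warfarin", "heparin", "enoxaparin", "rivaroxaban", "apixaban",
  "dabigatran", "edoxaban", "clopidogrel", "ticagrelor", "prasugrel",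
  "dipyridamole", "cilostazol", "fondaparinux", "dalteparin",
  "tinzaparin", "eptifibatide", "vorapaxar",
  "amlodipine", "nifedipine", "diltiazem", "verapamil", "felodipine",
  "nicardipine", "nimodipine", "isradipine", "clevidipine",
  "hydrochlorothiazide", "furosemide", "spironolactone", "chlorthalidone",
  "bumetanide", "torsemide", "torasemide", "amiloride", "triamterene",
  "indapamide", "metolazone", "eplerenone",
  "losartan", "valsartan", "irbesartan", "candesartan", "telmisartan",
  "olmesartan", "eprosartan", "azilsartan",
  "atorvastatin", "simvastatin", "rosuvastatin", "pravastatin",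
  "lovastatin", "fluvastatin", "pitavastatin",
  "metoprolol", "atenolol", "propranolol", "carvedilol", "bisoprolol",
  "nebivolol", "labetalol", "nadolol", "sotalol", "timolol",
  "acebutolol", "pindolol", "esmolol", "landiolol",
  "enalapril", "lisinopril", "ramipril", "captopril", "perindopril",
  "quinapril", "benazepril", "fosinopril", "trandolapril", "moexipril",
  "amiodarone", "flecainide", "propafenone", "dronedarone",
  "dofetilide", "ibutilide", "mexiletine", "procainamide",
  "quinidine", "disopyramide",
  "nitroglycerin", "isosorbide", "hydralazine", "minoxidil",
  "digoxin", "digitoxin", "milrinone", "ranolazine", "ivabradine",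
  "bosentan", "ambrisentan", "macitentan", "treprostinil", "epoprostenol",
  "iloprost", "sildenafil", "tadalafil",
  "fenofibrate", "gemfibrozil", "bezafibrate",
  "doxazosin", "prazosin", "terazosin",
  "clonidine", "methyldopa", "guanfacine",
  "aliskiren", "alirocumab", "evolocumab",
  "cholestyramine", "colestipol", "colesevelam",
  "niacin", "icosapent", "papaverine", "adenosine",
  "alteplase", "tenecteplase", "reteplase",
  "pentoxifylline"]

-- t[0]: every term in pvTermsB is a nonempty literal, so Python's t[0] never raises;
-- the ' ' default of the Option is never used.
def pvFirstCh (t : String) : Char := (PySem.Str.pyGet? t (0 : Int)).getD ' '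

-- by_first[t[0]] = by_first.get(t[0], []) + [t]  (Dict.modify is exactly d[k] = f(d.get(k, dflt)))
def pvByFirst : PySem.Dict Char (List String) :=
  pvTermsB.foldl (fun d t => d.modify (pvFirstCh t) [] (· ++ [t])) PySem.Dict.empty

-- inner loop: for t in by_first.get(ch, []): if drug_lower.startswith(t, i): return True
-- (suffix is drug_lower[i:], the list the outer recursion carries, so startswith(t, i) is exact)
def pvInnerB (ts : List String) (suffix : List Char) : Bool :=
  match ts with
  | [] => false
  | t :: rest => if PySem.Chars.startswith suffix t.toList then true else pvInnerB rest suffix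

-- outer loop over positions: the current suffix c :: rest IS drug_lower[i:], ch = c
def pvScanB (cs : List Char) : Bool :=
  match cs with
  | [] => false
  | c :: rest => if pvInnerB (pvByFirst.getD c []) (c :: rest) then true else pvScanB rest

def is_established_cv_drug_py_alt (drug_name : String) : Bool :=
  pvScanB (PySem.Str.strip (PySem.Str.lower drug_name)).toList

-- ===== PRECONDITION & SPEC =====
def Spec_is_established_cv_drug_py (drug_name : String) (out : Bool) : Prop := out = is_established_cv_drug_py_alt drug_name
instance (drug_name : String) (out : Bool) : Decidable (Spec_is_established_cv_drug_py drug_name out) := by unfold Spec_is_established_cv_drug_py; infer_instance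

-- ===== CLAIM (what is proved, stated in full; the proofs are below) =====
def Claim_equal_is_established_cv_drug_py : Prop := ∀ (drug_name : String), Dom_is_established_cv_drug_py drug_name → Spec_is_established_cv_drug_py drug_name (is_established_cv_drug_py drug_name)

-- ===== LEMMAS AND PROOFS =====

-- The two literal term collections are the same list.
theorem pvTerms_eq : pvAllCvDrugs = pvTermsB := by
  simp only [pvAllCvDrugs, pvAnticoag, pvCcbs, pvDiuretics, pvArbs, pvStatins, pvBetas,
    pvAceInhibitors, pvAntiarrhythmics, pvNitrates, pvOtherCv, pvTermsB,
    List.cons_append, List.nil_append]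

-- Every term is nonempty.
set_option maxRecDepth 4096 in
theorem pvTerms_ne_nil : ∀ t ∈ pvTermsB, t.toList ≠ [] := by decide

-- A's loop is List.any of membership.
theorem pvLoopA_eq_any (ts : List String) (s : String) :
    pvLoopA ts s = ts.any (fun t => PySem.Str.isIn t s) := by
  induction ts with
  | nil => rfl
  | cons t rest ih =>
      simp only [pvLoopA, List.any_cons, ih]
      cases PySem.Str.isIn t s <;> simp

-- B's inner loop is List.any of prefix test.
theorem pvInnerB_eq_any (ts : List String) (suffix : List Char) :
    pvInnerB ts suffix = ts.any (fun t => PySem.Chars.startswith suffix t.toList) := by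
  induction ts with
  | nil => rfl
  | cons t rest ih =>
      simp only [pvInnerB, List.any_cons, ih]
      cases PySem.Chars.startswith suffix t.toList <;> simp

-- the bucket for c holds exactly the terms whose first character is c
theorem pvByFirst_getD (c : Char) :
    pvByFirst.getD c [] = pvTermsB.filter (fun t => pvFirstCh t == c) := by
  have h := PySem.Dict.getD_foldl_modify_append
      (l := pvTermsB.map (fun t => (pvFirstCh t, t))) (d := PySem.Dict.empty) (c := c)
  simp only [List.foldl_map] at h
  rw [pvByFirst, h, PySem.Dict.getD_empty]
  simp [List.filter_map, Function.comp_def]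

-- first char of a nonempty term is its head
theorem pvFirstCh_head (t : String) (x : Char) (xs : List Char) (h : t.toList = x :: xs) :
    pvFirstCh t = x := by
  simp [pvFirstCh, PySem.Str.pyGet?_eq, h, PySem.List.pyGet?, PySem.List.pyIdx?]

-- B's scan finds exactly the terms occurring as an infix.
theorem pvScanB_iff (cs : List Char) :
    pvScanB cs = true ↔ ∃ t ∈ pvTermsB, t.toList <:+: cs := by
  induction cs with
  | nil =>
      constructor
      · intro h; exact absurd h (by simp [pvScanB])
      · rintro ⟨t, ht, hinf⟩
        exact absurd (List.eq_nil_of_infix_nil hinf) (pvTerms_ne_nil t ht)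
  | cons c rest ih =>
      simp only [pvScanB]
      constructor
      · intro h
        split at h
        · rename_i hin
          rw [pvInnerB_eq_any, List.any_eq_true] at hin
          obtain ⟨t, ht, hpre⟩ := hin
          rw [pvByFirst_getD, List.mem_filter] at ht
          exact ⟨t, ht.1, List.IsPrefix.isInfix ((PySem.Chars.startswith_iff _ _).mp hpre)⟩
        · obtain ⟨t, ht, hinf⟩ := ih.mp h
          exact ⟨t, ht, hinf.trans (List.suffix_cons c rest).isInfix⟩
      · rintro ⟨t, ht, hinf⟩
        rw [List.infix_cons_iff] at hinf
        rcases hinf with hpre | hinf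
        · have hne := pvTerms_ne_nil t ht
          obtain ⟨x, xs, hx⟩ := List.exists_cons_of_ne_nil hne
          have hxc : x = c := by
            obtain ⟨u, hu⟩ := hpre
            rw [hx, List.cons_append] at hu
            injection hu with hxc _
          have hmem : t ∈ pvByFirst.getD c [] := by
            rw [pvByFirst_getD, List.mem_filter]
            exact ⟨ht, by simp [pvFirstCh_head t x xs hx, hxc]⟩
          have : pvInnerB (pvByFirst.getD c []) (c :: rest) = true := by
            rw [pvInnerB_eq_any, List.any_eq_true]
            exact ⟨t, hmem, (PySem.Chars.startswith_iff _ _).mpr hpre⟩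
          simp [this]
        · have := ih.mpr ⟨t, ht, hinf⟩
          split <;> simp [this]

-- ===== VERDICT (by name: the statement is the Claim_ definition above) =====
theorem is_established_cv_drug_py_spec : Claim_equal_is_established_cv_drug_py := by
  intro drug_name _
  unfold Spec_is_established_cv_drug_py is_established_cv_drug_py is_established_cv_drug_py_alt
  set s := PySem.Str.strip (PySem.Str.lower drug_name) with hs
  rw [Bool.eq_iff_iff, pvLoopA_eq_any, List.any_eq_true, pvScanB_iff, pvTerms_eq]
  constructor
  · rintro ⟨t, ht, hin⟩
    exact ⟨t, ht, (PySem.Str.isIn_iff_infix _ _).mp hin⟩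
  · rintro ⟨t, ht, hinf⟩
    exact ⟨t, ht, (PySem.Str.isIn_iff_infix _ _).mpr hinf⟩
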